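-- pv_equiv track=rewrite | github.com/qiita-spots/qp-pacbio | qp_pacbio/qp_pacbio.py | search_by_filename
-- ===== SOURCE A (Python) =====
-- def search_by_filename(fname, lookup):
--     if fname in lookup:
--         return lookup[fname]
--
--     original = fname
--     while "_" in fname:
--         fname = fname.rsplit("_", 1)[0]
--         if fname in lookup:
--             return lookup[fname]
--
--     fname = original
--     while "." in fname:
--         fname = fname.rsplit(".", 1)[0]
--         if fname in lookup:
--             return lookup[fname]
--
--     for rp in lookup:
--         if original.startswith(rp):
--             return lookup[rp]
--
--     raise KeyError("Cannot determine run_prefix for %s" % original)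
-- ===== SOURCE B (Python) =====
-- def search_by_filename(fname, lookup):
--     # One pass over the dict: rank each key by how it matches fname
--     # (exact > underscore-truncation, latest cut first > dot-truncation,
--     # latest cut first > any other prefix, dict order), keep the best.
--     def rank(k):
--         if not fname.startswith(k):
--             return None
--         if len(k) == len(fname):
--             return (0, 0)
--         nxt = fname[len(k)]
--         if nxt == "_":
--             return (1, -len(k))
--         if nxt == ".":
--             return (2, -len(k))
--         return (3, 0)
--
--     best = None
--     for k in lookup:
--         r = rank(k)
--         if r is not None and (best is None or r < best[0]):
--             best = (r, k)
--     if best is None: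
--         raise KeyError("Cannot determine run_prefix for %s" % fname)
--     return lookup[best[1]]
-- ===== Notes on version B (the rewrite author's own statement) =====
-- stated objective: alternative
-- what changed: Inverted the search: instead of A's staged candidate generation (exact probe, two truncate-and-probe while-loops, then a prefix scan over the dict), B makes a single pass over the dict, ranking every key by how it matches fname (exact < underscore-truncation with latest cut first < dot-truncation with latest cut first < plain prefix in dict order) and returning the value of the best-ranked key.
import Mathlib
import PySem

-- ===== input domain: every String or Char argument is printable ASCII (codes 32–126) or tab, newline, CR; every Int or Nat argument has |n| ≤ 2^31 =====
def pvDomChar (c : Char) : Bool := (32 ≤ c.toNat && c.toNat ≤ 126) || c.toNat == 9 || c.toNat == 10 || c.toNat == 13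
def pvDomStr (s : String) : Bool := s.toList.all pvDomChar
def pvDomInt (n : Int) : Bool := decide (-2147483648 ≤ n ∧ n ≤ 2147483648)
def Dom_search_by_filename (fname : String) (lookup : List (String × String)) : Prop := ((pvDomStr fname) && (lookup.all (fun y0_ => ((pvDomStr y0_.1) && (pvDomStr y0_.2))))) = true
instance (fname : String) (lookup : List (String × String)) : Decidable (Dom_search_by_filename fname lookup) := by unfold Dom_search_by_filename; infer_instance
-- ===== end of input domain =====

-- B inverts A's candidate-probing loops: ONE pass over the dict ranks every key by how
-- it matches fname (exact; underscore-truncation, latest cut first; dot-truncation,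
-- latest cut first; plain prefix in dict order) and keeps the best rank; objective:
-- alternative structure, same cost. A raises KeyError when no key is a prefix of fname;
-- those inputs are outside Pre_ (B raises the same KeyError there).

-- s.rsplit(c, 1)[0] for a 1-char separator c that occurs in s (both callers check
-- membership first, so this is exact there): everything before the LAST occurrence of c.
def cutLast (s : List Char) (c : Char) : List Char :=
  ((s.reverse.dropWhile (· != c)).drop 1).reverse

-- termination fact cited by A's two loops
theorem cutLast_length_lt (s : List Char) (c : Char) (h : c ∈ s) :
    (cutLast s c).length < s.length := by
  have hne : s.reverse.dropWhile (· != c) ≠ [] := by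
    intro hnil
    have := (List.dropWhile_eq_nil_iff).mp hnil c (by simpa using h)
    simp at this
  have h1 : 1 ≤ (s.reverse.dropWhile (· != c)).length := by
    cases hd : s.reverse.dropWhile (· != c) with
    | nil => exact absurd hd hne
    | cons a t => simp
  have h2 : (s.reverse.dropWhile (· != c)).length ≤ s.length := by
    simpa using List.length_dropWhile_le (· != c) s.reverse
  simp only [cutLast, List.length_reverse, List.length_drop]
  omega

-- ===== PORT A =====
-- one of A's two 'while sep in fname' loops: truncate at the last separator, check, repeat
def loopA (d : PySem.Dict String String) (c : Char) (s : List Char) : Option String :=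
  if _h : c ∈ s then
    match d.get? (String.ofList (cutLast s c)) with
    | some v => some v
    | none => loopA d c (cutLast s c)
  else none
termination_by s.length
decreasing_by exact cutLast_length_lt s c _h

-- A's final 'for rp in lookup: if original.startswith(rp): return lookup[rp]'
def prefScanA (original : String) (d : PySem.Dict String String) : List String → Option String
  | [] => none
  | k :: ks =>
      if PySem.Str.startswith original k then some (d.getD k "") else prefScanA original d ks

def search_by_filename (fname : String) (lookup : List (String × String)) : String :=
  let d := PySem.Dict.ofList lookup
  match d.get? fname with
  | some v => v
  | none =>
    match loopA d '_' fname.toList with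
    | some v => v
    | none =>
      match loopA d '.' fname.toList with
      | some v => v
      | none =>
        match prefScanA fname d d.keys with
        | some v => v
        | none => ""   -- Python raises KeyError here; outside Pre_

-- ===== PORT B =====
-- Source B's rank(k): how key k matches fname; None = no match
def rankB (fname : String) (k : String) : Option (Int × Int) :=
  if PySem.Str.startswith fname k then
    if PySem.Str.len k = PySem.Str.len fname then some (0, 0)
    else
      match PySem.Str.pyGet? fname (PySem.Str.len k) with   -- fname[len(k)]
      | some nxt =>
        if nxt = '_' then some (1, -(PySem.Str.len k))
        else if nxt = '.' then some (2, -(PySem.Str.len k))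
        else some (3, 0)
      | none => none   -- unreachable: k is a strict prefix of fname, index in range
  else none

-- Python tuple '<' on the int pairs rank returns
def ltRank (a b : Int × Int) : Bool := a.1 < b.1 || (a.1 == b.1 && a.2 < b.2)

-- Source B's loop body: keep the best (rank, key) seen so far
def bestStep (fname : String) (best : Option ((Int × Int) × String)) (k : String) :
    Option ((Int × Int) × String) :=
  match rankB fname k with
  | none => best
  | some r =>
    match best with
    | none => some (r, k)
    | some (rb, kb) => if ltRank r rb then some (r, k) else some (rb, kb)

def search_by_filename_alt (fname : String) (lookup : List (String × String)) : String :=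
  let d := PySem.Dict.ofList lookup
  match d.keys.foldl (bestStep fname) none with
  | some (_, k) => d.getD k ""
  | none => ""   -- Python raises KeyError here; outside Pre_

-- ===== PRECONDITION & SPEC =====
-- exactly the inputs on which A returns normally: some key of lookup is a prefix of fname
-- (every successful candidate is itself a prefix of fname, so A's final prefix scan
-- succeeds whenever any earlier stage would; otherwise A raises KeyError)
def Pre_search_by_filename (fname : String) (lookup : List (String × String)) : Prop :=
  (lookup.any (fun kv => PySem.Str.startswith fname kv.1)) = true
instance (fname : String) (lookup : List (String × String)) : Decidable (Pre_search_by_filename fname lookup) := by unfold Pre_search_by_filename; infer_instance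

def pvWitness_search_by_filename : String × (List (String × String)) :=
  ("sample_1.fastq", [("sample", "run1")])

def Spec_search_by_filename (fname : String) (lookup : List (String × String)) (out : String) : Prop := out = search_by_filename_alt fname lookup
instance (fname : String) (lookup : List (String × String)) (out : String) : Decidable (Spec_search_by_filename fname lookup out) := by unfold Spec_search_by_filename; infer_instance

-- ===== CLAIM (what is proved, stated in full; the proofs are below) =====
def Claim_equal_search_by_filename : Prop := ∀ (fname : String) (lookup : List (String × String)), Dom_search_by_filename fname lookup → Pre_search_by_filename fname lookup → Spec_search_by_filename fname lookup (search_by_filename fname lookup)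

-- ===== LEMMAS AND PROOFS =====

def pickMin (fname : String) : List String → Option ((Int × Int) × String)
  | [] => none
  | k :: ks =>
    match rankB fname k, pickMin fname ks with
    | none, m => m
    | some r, none => some (r, k)
    | some r, some (r', k') => if ltRank r' r then some (r', k') else some (r, k)


theorem foldl_bestStep_some (fname : String) (l : List String) (rb : Int × Int) (kb : String) :
    l.foldl (bestStep fname) (some (rb, kb)) =
      match pickMin fname l with
      | none => some (rb, kb)
      | some (r, k) => if ltRank r rb = true then some (r, k) else some (rb, kb) := by
  induction l generalizing rb kb with
  | nil => simp [pickMin]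
  | cons k l ih =>
    simp only [List.foldl_cons, pickMin]
    cases hr : rankB fname k with
    | none => rw [bestStep, hr, ih]
    | some r =>
      rw [bestStep, hr]
      have ihrk := ih r k
      have ihrb := ih rb kb
      cases hp : pickMin fname l with
      | none =>
        rw [hp] at ihrk ihrb
        by_cases hlt : ltRank r rb = true
        · simp [hlt, ihrk]
        · simp [hlt, ihrb]
      | some m =>
        obtain ⟨r', k'⟩ := m
        rw [hp] at ihrk ihrb
        by_cases hlt : ltRank r rb = true <;> by_cases h2 : ltRank r' r = true
        · have t1 : ltRank r' rb = true := by simp [ltRank] at h2 hlt ⊢; omega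
          simp [hlt, h2, t1, ihrk]
        · simp [hlt, h2, ihrk]
        · simp [hlt, h2, ihrb]
        · have t1 : ltRank r' rb = false := by
            simp [ltRank] at h2 hlt ⊢; omega
          simp [hlt, h2, t1, ihrb]

theorem foldl_bestStep_none (fname : String) (l : List String) :
    l.foldl (bestStep fname) none = pickMin fname l := by
  cases l with
  | nil => rfl
  | cons k l =>
    simp only [List.foldl_cons, pickMin]
    cases hr : rankB fname k with
    | none => rw [bestStep, hr, foldl_bestStep_none]
    | some r =>
      rw [bestStep, hr, foldl_bestStep_some]
      cases hp : pickMin fname l with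
      | none => simp
      | some m => obtain ⟨r', k'⟩ := m; simp

theorem pickMin_none (fname : String) (l : List String) (h : pickMin fname l = none) :
    ∀ x ∈ l, rankB fname x = none := by
  induction l with
  | nil => simp
  | cons k l ih =>
    rw [pickMin] at h
    cases hr : rankB fname k with
    | none =>
      rw [hr] at h
      intro x hx
      rcases List.mem_cons.mp hx with rfl | hx
      · exact hr
      · exact ih h x hx
    | some r =>
      rw [hr] at h
      cases hp : pickMin fname l with
      | none => rw [hp] at h; simp at h
      | some m => obtain ⟨r', k'⟩ := m; rw [hp] at h; by_cases h2 : ltRank r' r = true <;> simp [h2] at h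

theorem pickMin_mem (fname : String) (l : List String) (r : Int × Int) (k : String)
    (h : pickMin fname l = some (r, k)) : k ∈ l ∧ rankB fname k = some r := by
  induction l generalizing r k with
  | nil => simp [pickMin] at h
  | cons k0 l ih =>
    rw [pickMin] at h
    cases hr : rankB fname k0 with
    | none =>
      rw [hr] at h
      obtain ⟨hm, hrk⟩ := ih r k h
      exact ⟨List.mem_cons_of_mem _ hm, hrk⟩
    | some r0 =>
      rw [hr] at h
      cases hp : pickMin fname l with
      | none =>
        rw [hp] at h
        simp at h
        obtain ⟨rfl, rfl⟩ := h
        exact ⟨List.mem_cons_self, hr⟩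
      | some m =>
        obtain ⟨r', k'⟩ := m
        rw [hp] at h
        by_cases h2 : ltRank r' r0 = true
        · simp [h2] at h
          obtain ⟨rfl, rfl⟩ := h
          obtain ⟨hm, hrk⟩ := ih _ _ hp
          exact ⟨List.mem_cons_of_mem _ hm, hrk⟩
        · simp [h2] at h
          obtain ⟨rfl, rfl⟩ := h
          exact ⟨List.mem_cons_self, hr⟩

theorem pickMin_min (fname : String) (l : List String) (r : Int × Int) (k : String)
    (h : pickMin fname l = some (r, k)) :
    ∀ x ∈ l, ∀ r', rankB fname x = some r' → ltRank r' r = false := by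
  induction l generalizing r k with
  | nil => simp [pickMin] at h
  | cons k0 l ih =>
    rw [pickMin] at h
    intro x hx r' hx'
    cases hr : rankB fname k0 with
    | none =>
      rw [hr] at h
      rcases List.mem_cons.mp hx with rfl | hm
      · rw [hr] at hx'; exact absurd hx' (by simp)
      · exact ih _ _ h x hm r' hx'
    | some r0 =>
      rw [hr] at h
      cases hp : pickMin fname l with
      | none =>
        rw [hp] at h
        simp at h
        obtain ⟨rfl, rfl⟩ := h
        rcases List.mem_cons.mp hx with rfl | hm
        · rw [hr] at hx'
          injection hx' with e; subst e
          simp [ltRank]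
          try omega
        · rw [pickMin_none fname l hp x hm] at hx'; exact absurd hx' (by simp)
      | some m =>
        obtain ⟨r1, k1⟩ := m
        rw [hp] at h
        by_cases h2 : ltRank r1 r0 = true
        · simp [h2] at h
          obtain ⟨rfl, rfl⟩ := h
          rcases List.mem_cons.mp hx with rfl | hm
          · rw [hr] at hx'
            injection hx' with e; subst e
            simp [ltRank] at h2 ⊢; omega
          · exact ih _ _ hp x hm r' hx'
        · simp [h2] at h
          obtain ⟨rfl, rfl⟩ := h
          rcases List.mem_cons.mp hx with rfl | hm
          · rw [hr] at hx'
            injection hx' with e; subst e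
            simp [ltRank]
          try omega
          · have := ih r1 k1 hp x hm r' hx'
            simp [ltRank] at h2 this ⊢; omega

theorem pickMin_first (fname : String) (l : List String) (r : Int × Int) (k : String)
    (h : pickMin fname l = some (r, k)) :
    ∃ l1 l2, l = l1 ++ k :: l2 ∧ ∀ x ∈ l1, ∀ r', rankB fname x = some r' → ltRank r r' = true := by
  induction l generalizing r k with
  | nil => simp [pickMin] at h
  | cons k0 l ih =>
    rw [pickMin] at h
    cases hr : rankB fname k0 with
    | none =>
      rw [hr] at h
      obtain ⟨l1, l2, rfl, hl1⟩ := ih _ _ h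
      refine ⟨k0 :: l1, l2, rfl, ?_⟩
      intro x hx r' hx'
      rcases List.mem_cons.mp hx with rfl | hm
      · rw [hr] at hx'; exact absurd hx' (by simp)
      · exact hl1 x hm r' hx'
    | some r0 =>
      rw [hr] at h
      cases hp : pickMin fname l with
      | none =>
        rw [hp] at h
        simp at h
        obtain ⟨rfl, rfl⟩ := h
        exact ⟨[], l, rfl, by simp⟩
      | some m =>
        obtain ⟨r1, k1⟩ := m
        rw [hp] at h
        by_cases h2 : ltRank r1 r0 = true
        · simp [h2] at h
          obtain ⟨rfl, rfl⟩ := h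
          obtain ⟨l1, l2, rfl, hl1⟩ := ih _ _ hp
          refine ⟨k0 :: l1, l2, rfl, ?_⟩
          intro x hx r' hx'
          rcases List.mem_cons.mp hx with rfl | hm
          · rw [hr] at hx'
            injection hx' with e; subst e
            exact h2
          · exact hl1 x hm r' hx'
        · simp [h2] at h
          obtain ⟨rfl, rfl⟩ := h
          exact ⟨[], l, rfl, by simp⟩


def chops (s : List Char) (c : Char) : List (List Char) :=
  if _h : c ∈ s then cutLast s c :: chops (cutLast s c) c else []
termination_by s.length
decreasing_by exact cutLast_length_lt s c _h


theorem cutLast_spec (s : List Char) (c : Char) (h : c ∈ s) :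
    ∃ u, s = cutLast s c ++ c :: u ∧ ∀ x ∈ u, x ≠ c := by
  have hne : s.reverse.dropWhile (· != c) ≠ [] := by
    intro hnil
    have := (List.dropWhile_eq_nil_iff).mp hnil c (by simpa using h)
    simp at this
  have hhead : (s.reverse.dropWhile (· != c)).head hne = c := by
    have := List.head_dropWhile_not (l := s.reverse) (p := (· != c)) hne
    simpa using this
  have hcons : s.reverse.dropWhile (· != c) =
      c :: (s.reverse.dropWhile (· != c)).tail := by
    conv_lhs => rw [← List.cons_head_tail hne, hhead]
  refine ⟨(s.reverse.takeWhile (· != c)).reverse, ?_, ?_⟩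
  · have hs : s = (s.reverse.takeWhile (· != c) ++ s.reverse.dropWhile (· != c)).reverse := by
      rw [List.takeWhile_append_dropWhile, List.reverse_reverse]
    have hcut : cutLast s c = (s.reverse.dropWhile (· != c)).tail.reverse := by
      rw [cutLast]
      conv_lhs => rw [hcons]
      simp
    conv_lhs => rw [hs, hcons]
    rw [hcut]
    simp
  · intro x hx
    have hx' : x ∈ s.reverse.takeWhile (· != c) := by simpa using hx
    have := List.mem_takeWhile_imp hx'
    simpa using this

theorem cutLast_prefix (s : List Char) (c : Char) (h : c ∈ s) : cutLast s c <+: s := by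
  obtain ⟨u, hu, -⟩ := cutLast_spec s c h
  exact ⟨c :: u, hu.symm⟩

theorem cutLast_getElem? (s : List Char) (c : Char) (h : c ∈ s) :
    s[(cutLast s c).length]? = some c := by
  obtain ⟨u, hu, -⟩ := cutLast_spec s c h
  have : (cutLast s c ++ c :: u)[(cutLast s c).length]? = some c := by
    rw [List.getElem?_append_right (le_refl _)]
    simp
  rw [← hu] at this
  exact this

theorem cutLast_last (s : List Char) (c : Char) (h : c ∈ s) :
    ∀ i, (cutLast s c).length < i → s[i]? ≠ some c := by
  obtain ⟨u, hu, hnc⟩ := cutLast_spec s c h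
  intro i hi he
  rw [hu, List.getElem?_append_right (by omega)] at he
  have hsub : i - (cutLast s c).length = (i - (cutLast s c).length - 1) + 1 := by omega
  rw [hsub] at he
  simp only [List.getElem?_cons_succ] at he
  exact hnc c (List.mem_of_getElem? he) rfl

theorem prefix_getElem?_some {l s : List Char} {i : Nat} {a : Char}
    (h : l <+: s) (hi : l[i]? = some a) : s[i]? = some a := by
  obtain ⟨t, rfl⟩ := h
  have : i < l.length := (List.getElem?_eq_some_iff.mp hi).1
  rw [List.getElem?_append_left this]
  exact hi

theorem prefix_getElem?_back {l s : List Char} {i : Nat} {a : Char}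
    (h : l <+: s) (hil : i < l.length) (hi : s[i]? = some a) : l[i]? = some a := by
  obtain ⟨t, rfl⟩ := h
  rw [List.getElem?_append_left hil] at hi
  exact hi

theorem chops_sub (s : List Char) (c : Char) :
    ∀ cs ∈ chops s c, cs <+: s ∧ s[cs.length]? = some c := by
  fun_induction chops s c with
  | case1 s h ih =>
    intro cs hcs
    rcases List.mem_cons.mp hcs with rfl | hm
    · exact ⟨cutLast_prefix s c h, cutLast_getElem? s c h⟩
    · obtain ⟨hp, hg⟩ := ih cs hm
      exact ⟨hp.trans (cutLast_prefix s c h),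
        prefix_getElem?_some (cutLast_prefix s c h) hg⟩
  | case2 s h => simp

theorem chops_mem_of (s : List Char) (c : Char) (cs : List Char)
    (hpre : cs <+: s) (hch : s[cs.length]? = some c) : cs ∈ chops s c := by
  fun_induction chops s c with
  | case1 s h ih =>
    have hlt : cs.length < s.length := (List.getElem?_eq_some_iff.mp hch).1
    have hle : cs.length ≤ (cutLast s c).length := by
      by_contra hgt
      exact cutLast_last s c h cs.length (by omega) hch
    rcases Nat.lt_or_eq_of_le hle with hlt2 | heq
    · have hpre2 : cs <+: cutLast s c :=
        List.prefix_of_prefix_length_le hpre (cutLast_prefix s c h) (by omega)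
      have hch2 : (cutLast s c)[cs.length]? = some c :=
        prefix_getElem?_back (cutLast_prefix s c h) hlt2 hch
      exact List.mem_cons_of_mem _ (ih hpre2 hch2)
    · have : cs = cutLast s c := by
        have e1 : cs = s.take cs.length := (List.prefix_iff_eq_take.mp hpre)
        have e2 : cutLast s c = s.take (cutLast s c).length :=
          (List.prefix_iff_eq_take.mp (cutLast_prefix s c h))
        rw [e1, e2, heq]
      rw [this]
      exact List.mem_cons_self
  | case2 s h =>
    exact absurd (List.mem_of_getElem? hch) h

theorem chops_pairwise (s : List Char) (c : Char) :
    (chops s c).Pairwise (fun a b => b.length < a.length) := by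
  fun_induction chops s c with
  | case1 s h ih =>
    refine List.Pairwise.cons ?_ ih
    intro b hb
    obtain ⟨-, hg⟩ := chops_sub (cutLast s c) c b hb
    exact (List.getElem?_eq_some_iff.mp hg).1
  | case2 s h => simp

theorem mem_chops_iff (s : List Char) (c : Char) (cs : List Char) :
    cs ∈ chops s c ↔ (cs <+: s ∧ s[cs.length]? = some c) :=
  ⟨chops_sub s c cs, fun ⟨h1, h2⟩ => chops_mem_of s c cs h1 h2⟩


-- A's check-as-you-go loop is the first-hit search over the truncation list
theorem loopA_eq_findSome? (d : PySem.Dict String String) (c : Char) (s : List Char) :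
    loopA d c s = (chops s c).findSome? (fun cs => d.get? (String.ofList cs)) := by
  fun_induction loopA d c s with
  | case1 s h v hv =>
      rw [chops]
      simp [h, hv]
  | case2 s h hv ih =>
      rw [chops]
      simp [h, hv, ih]
  | case3 s h =>
      rw [chops]
      simp [h]

-- A's explicit prefix-scan recursion is find?-then-lookup
theorem prefScanA_eq_find? (original : String) (d : PySem.Dict String String)
    (ks : List String) :
    prefScanA original d ks =
      (ks.find? (fun rp => PySem.Str.startswith original rp)).map (fun rp => d.getD rp "") := by
  induction ks with
  | nil => rfl
  | cons k ks ih =>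
      by_cases h : PySem.Chars.startswith original.toList k.toList = true
      · simp [prefScanA, List.find?, PySem.Str.startswith, h]
      · simp [prefScanA, List.find?, PySem.Str.startswith, h, ih]

theorem rankB_none_iff (fname k : String) :
    rankB fname k = none ↔ PySem.Str.startswith fname k = false := by
  unfold rankB
  cases hs : PySem.Str.startswith fname k with
  | false => simp
  | true =>
    have hpre : k.toList <+: fname.toList := by
      have := (PySem.Chars.startswith_iff fname.toList k.toList).mp (by simpa using hs)
      exact this
    by_cases hl : PySem.Str.len k = PySem.Str.len fname
    · have he : k.length = fname.length := by
        simp only [PySem.Str.len_eq] at hl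
        exact_mod_cast hl
      simp [he]
    · have hlen : k.length ≠ fname.length := by
        simp only [PySem.Str.len_eq] at hl
        exact_mod_cast hl
      have hlt : k.length < fname.toList.length := by
        have := hpre.length_le
        simp at this ⊢
        omega
      obtain ⟨ch, hg⟩ : ∃ ch, fname.toList[k.length]? = some ch :=
        ⟨_, List.getElem?_eq_getElem hlt⟩
      simp only [hl, if_false]
      simp only [PySem.Str.len_eq]
      rw [PySem.Str.pyGet?_natCast]
      simp only [if_true]
      rw [show fname.toList[k.toList.length]? = some ch from by simpa using hg]
      constructor
      · intro h
        dsimp only at h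
        split_ifs at h
      · intro h
        simp at h

theorem rankB_of_next (fname k : String) (hpre : k.toList <+: fname.toList) (ch : Char)
    (hch : fname.toList[k.toList.length]? = some ch) :
    rankB fname k = some (if ch = '_' then (1, -(k.toList.length : Int))
      else if ch = '.' then (2, -(k.toList.length : Int)) else (3, 0)) := by
  have hs : PySem.Str.startswith fname k = true := by
    simp [PySem.Chars.startswith_iff, hpre]
  have hlt : k.toList.length < fname.toList.length := (List.getElem?_eq_some_iff.mp hch).1
  have hlen : k.length ≠ fname.length := by
    simp at hlt ⊢
    omega
  have hg : fname.toList[k.length]? = some ch := by simpa using hch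
  unfold rankB
  rw [hs]
  simp only [if_true, PySem.Str.len_eq]
  rw [if_neg (by exact_mod_cast hlen)]
  rw [PySem.Str.pyGet?_natCast]
  rw [show fname.toList[k.toList.length]? = some ch from by simpa using hg]
  rcases eq_or_ne ch '_' with rfl | c1
  · simp
  · rcases eq_or_ne ch '.' with rfl | c2
    · simp [c1]
    · simp [c1, c2]

theorem rankB_self (fname : String) : rankB fname fname = some (0, 0) := by
  unfold rankB
  rw [if_pos (by simp [PySem.Chars.startswith_iff]), if_pos rfl]

theorem rankB_cases (fname k : String) (r : Int × Int) (h : rankB fname k = some r) :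
    (r = (0, 0) ∧ k = fname) ∨
    (r = (1, -(k.toList.length : Int)) ∧ k.toList <+: fname.toList ∧
      fname.toList[k.toList.length]? = some '_') ∨
    (r = (2, -(k.toList.length : Int)) ∧ k.toList <+: fname.toList ∧
      fname.toList[k.toList.length]? = some '.') ∨
    (r = (3, 0) ∧ k.toList <+: fname.toList ∧
      ∃ ch, fname.toList[k.toList.length]? = some ch ∧ ch ≠ '_' ∧ ch ≠ '.') := by
  unfold rankB at h
  by_cases hs : PySem.Str.startswith fname k = true
  · rw [hs] at h
    have hpre : k.toList <+: fname.toList := by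
      have := (PySem.Chars.startswith_iff fname.toList k.toList).mp (by simpa using hs)
      exact this
    simp only [if_true, PySem.Str.len_eq] at h
    by_cases hl : k.length = fname.length
    · left
      rw [if_pos (by exact_mod_cast hl)] at h
      refine ⟨by simpa using h.symm, ?_⟩
      have : k.toList = fname.toList := hpre.eq_of_length (by simpa using hl)
      exact String.toList_inj.mp this
    · rw [if_neg (by exact_mod_cast hl)] at h
      have hlt : k.length < fname.toList.length := by
        have := hpre.length_le
        simp at this ⊢
        omega
      obtain ⟨ch, hg⟩ : ∃ ch, fname.toList[k.length]? = some ch :=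
        ⟨_, List.getElem?_eq_getElem hlt⟩
      have hg' : fname.toList[k.toList.length]? = some ch := by simpa using hg
      rw [PySem.Str.pyGet?_natCast, hg'] at h
      dsimp only at h
      by_cases h1 : ch = '_'
      · right; left
        rw [if_pos h1] at h
        subst h1
        exact ⟨by simpa using h.symm, hpre, hg'⟩
      · by_cases h2 : ch = '.'
        · right; right; left
          rw [if_neg h1, if_pos h2] at h
          subst h2
          exact ⟨by simpa using h.symm, hpre, hg'⟩
        · right; right; right
          rw [if_neg h1, if_neg h2] at h
          exact ⟨by simpa using h.symm, hpre, ch, hg', h1, h2⟩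
  · rw [if_neg hs] at h
    simp at h


theorem get?_of_mem_keys (d : PySem.Dict String String) (k : String) (h : k ∈ d.keys) :
    ∃ v, d.get? k = some v := by
  cases hg : d.get? k with
  | some v => exact ⟨v, rfl⟩
  | none =>
      rw [PySem.Dict.get?_eq_none_iff_not_mem_keys] at hg
      exact absurd h hg

theorem mem_keys_of_get? (d : PySem.Dict String String) (k v : String)
    (h : d.get? k = some v) : k ∈ d.keys := by
  by_contra hm
  rw [← PySem.Dict.get?_eq_none_iff_not_mem_keys] at hm
  rw [hm] at h
  simp at h

theorem getD_eq_of_get? (d : PySem.Dict String String) (k v : String)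
    (h : d.get? k = some v) : d.getD k "" = v := by
  rw [PySem.Dict.getD_eq_get?_getD, h]
  rfl


theorem stage_glue (d : PySem.Dict String String) (fname : String) (c : Char) (k : String)
    (hpre : k.toList <+: fname.toList) (hch : fname.toList[k.toList.length]? = some c)
    (hkey : k ∈ d.keys)
    (hmin : ∀ x, x ∈ chops fname.toList c → ∀ v, d.get? (String.ofList x) = some v →
      x.length ≤ k.toList.length) :
    (chops fname.toList c).findSome? (fun cs => d.get? (String.ofList cs)) =
      some (d.getD k "") := by
  have hmem : k.toList ∈ chops fname.toList c :=
    (mem_chops_iff fname.toList c k.toList).mpr ⟨hpre, hch⟩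
  obtain ⟨l1, l2, hsplit⟩ := List.append_of_mem hmem
  have hpw := chops_pairwise fname.toList c
  rw [hsplit] at hpw
  have hlong : ∀ x ∈ l1, k.toList.length < x.length := by
    intro x hx
    exact (List.pairwise_append.mp hpw).2.2 x hx k.toList List.mem_cons_self
  have hnone : ∀ x ∈ l1, d.get? (String.ofList x) = none := by
    intro x hx
    cases hgx : d.get? (String.ofList x) with
    | none => rfl
    | some v =>
      have hxm : x ∈ chops fname.toList c := by
        rw [hsplit]; exact List.mem_append_left _ hx
      have := hmin x hxm v hgx
      have := hlong x hx
      omega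
  rw [hsplit, List.findSome?_append, List.findSome?_eq_none_iff.mpr hnone]
  obtain ⟨v, hv⟩ := get?_of_mem_keys d k hkey
  simp only [Option.none_or, List.findSome?_cons]
  rw [show String.ofList k.toList = k from by simp, hv]
  dsimp only
  rw [getD_eq_of_get? d k v hv]

theorem stage_none (d : PySem.Dict String String) (fname : String) (c : Char)
    (s1 : Int) (r : Int × Int)
    (hmin : ∀ x ∈ d.keys, ∀ r', rankB fname x = some r' → ltRank r' r = false)
    (hs1 : (c = '_' ∧ s1 = 1) ∨ (c = '.' ∧ s1 = 2))
    (hlt : ∀ len : Nat, ltRank (s1, -(len : Int)) r = true) :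
    (chops fname.toList c).findSome? (fun cs => d.get? (String.ofList cs)) = none := by
  apply List.findSome?_eq_none_iff.mpr
  intro cs hcs
  cases hgx : d.get? (String.ofList cs) with
  | none => rfl
  | some v =>
    obtain ⟨hp, hc⟩ := chops_sub fname.toList c cs hcs
    have hkm := mem_keys_of_get? d (String.ofList cs) v hgx
    have hrx := rankB_of_next fname (String.ofList cs) (by simpa using hp) c
      (by simpa using hc)
    have hfalse : ltRank (s1, -(cs.length : Int)) r = false := by
      rcases hs1 with ⟨rfl, rfl⟩ | ⟨rfl, rfl⟩
      · exact hmin (String.ofList cs) hkm _ (by simpa using hrx)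
      · exact hmin (String.ofList cs) hkm _ (by simpa using hrx)
    rw [hlt cs.length] at hfalse
    exact Bool.noConfusion hfalse


theorem search_by_filename_eq_alt_main (fname : String) (d : PySem.Dict String String) :
    (match d.get? fname with
     | some v => v
     | none =>
       match (chops fname.toList '_').findSome? (fun cs => d.get? (String.ofList cs)) with
       | some v => v
       | none =>
         match (chops fname.toList '.').findSome? (fun cs => d.get? (String.ofList cs)) with
         | some v => v
         | none =>
           match (d.keys.find? (fun rp => PySem.Str.startswith fname rp)).map
               (fun rp => d.getD rp "") with
           | some v => v
           | none => "") =
    (match pickMin fname d.keys with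
     | some (_, k) => d.getD k ""
     | none => "") := by
  cases hm : pickMin fname d.keys with
  | none =>
    have hall := pickMin_none fname d.keys hm
    have h0 : d.get? fname = none := by
      cases hg : d.get? fname with
      | none => rfl
      | some v =>
        have := hall fname (mem_keys_of_get? d fname v hg)
        rw [rankB_self fname] at this
        simp at this
    have hstage : ∀ c : Char, (chops fname.toList c).findSome?
        (fun cs => d.get? (String.ofList cs)) = none := by
      intro c
      apply List.findSome?_eq_none_iff.mpr
      intro cs hcs
      cases hgx : d.get? (String.ofList cs) with
      | none => rfl
      | some v =>
        obtain ⟨hp, hc⟩ := chops_sub fname.toList c cs hcs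
        have hkm := mem_keys_of_get? d (String.ofList cs) v hgx
        have := hall (String.ofList cs) hkm
        rw [rankB_of_next fname (String.ofList cs) (by simpa using hp) c
          (by simpa using hc)] at this
        simp at this
    have hfind : d.keys.find? (fun rp => PySem.Str.startswith fname rp) = none := by
      apply List.find?_eq_none.mpr
      intro x hx
      have := hall x hx
      rw [rankB_none_iff] at this
      simpa using this
    rw [h0, hstage '_', hstage '.', hfind]
    rfl
  | some m =>
    obtain ⟨r, k⟩ := m
    obtain ⟨hkmem, hkrank⟩ := pickMin_mem fname d.keys r k hm
    have hmin := pickMin_min fname d.keys r k hm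
    have h0none : ltRank (0, 0) r = true → d.get? fname = none := by
      intro hlt
      cases hg : d.get? fname with
      | none => rfl
      | some v =>
        have := hmin fname (mem_keys_of_get? d fname v hg) (0, 0) (rankB_self fname)
        rw [hlt] at this
        simp at this
    rcases rankB_cases fname k r hkrank with ⟨rfl, heq⟩ | ⟨rfl, hpre, hch⟩ |
      ⟨rfl, hpre, hch⟩ | ⟨rfl, hpre, ch, hch, hch1, hch2⟩
    · -- exact match
      obtain ⟨v, hv⟩ := get?_of_mem_keys d k hkmem
      rw [heq] at hv
      rw [hv]
      dsimp only
      rw [← heq] at hv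
      exact (getD_eq_of_get? d k v hv).symm
    · -- underscore stage wins
      have h0 : d.get? fname = none := h0none (by simp [ltRank])
      have hminlen : ∀ x, x ∈ chops fname.toList '_' → ∀ v,
          d.get? (String.ofList x) = some v → x.length ≤ k.toList.length := by
        intro x hx v hv
        obtain ⟨hp, hcx⟩ := chops_sub fname.toList '_' x hx
        have hkm := mem_keys_of_get? d (String.ofList x) v hv
        have hrx := rankB_of_next fname (String.ofList x) (by simpa using hp) '_'
          (by simpa using hcx)
        have := hmin (String.ofList x) hkm _ (by simpa using hrx)
        simp [ltRank] at this
        have hlen : k.toList.length = k.length := by simp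
        omega
      rw [h0, stage_glue d fname '_' k hpre hch hkmem hminlen]
    · -- dot stage wins
      have h0 : d.get? fname = none := h0none (by simp [ltRank])
      have hs1 := stage_none d fname '_' 1 _ hmin (Or.inl ⟨rfl, rfl⟩)
        (fun len => by simp [ltRank])
      have hminlen : ∀ x, x ∈ chops fname.toList '.' → ∀ v,
          d.get? (String.ofList x) = some v → x.length ≤ k.toList.length := by
        intro x hx v hv
        obtain ⟨hp, hcx⟩ := chops_sub fname.toList '.' x hx
        have hkm := mem_keys_of_get? d (String.ofList x) v hv
        have hrx := rankB_of_next fname (String.ofList x) (by simpa using hp) '.'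
          (by simpa using hcx)
        have := hmin (String.ofList x) hkm _ (by simpa using hrx)
        simp [ltRank] at this
        have hlen : k.toList.length = k.length := by simp
        omega
      rw [h0, hs1, stage_glue d fname '.' k hpre hch hkmem hminlen]
    · -- prefix-scan stage wins
      have h0 : d.get? fname = none := h0none (by simp [ltRank])
      have hs1 := stage_none d fname '_' 1 _ hmin (Or.inl ⟨rfl, rfl⟩)
        (fun len => by simp [ltRank])
      have hs2 := stage_none d fname '.' 2 _ hmin (Or.inr ⟨rfl, rfl⟩)
        (fun len => by simp [ltRank])
      obtain ⟨l1, l2, hsplit, hl1⟩ := pickMin_first fname d.keys (3, 0) k hm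
      have hfind : d.keys.find? (fun rp => PySem.Str.startswith fname rp) = some k := by
        rw [hsplit, List.find?_append]
        have hn : l1.find? (fun rp => PySem.Str.startswith fname rp) = none := by
          apply List.find?_eq_none.mpr
          intro x hx hsx
          cases hrx : rankB fname x with
          | none =>
            rw [rankB_none_iff] at hrx
            rw [hrx] at hsx
            exact Bool.noConfusion hsx
          | some rx =>
            have hlt := hl1 x hx rx hrx
            rcases rankB_cases fname x rx hrx with ⟨rfl, -⟩ | ⟨rfl, -, -⟩ |
              ⟨rfl, -, -⟩ | ⟨rfl, -, -⟩ <;> simp [ltRank] at hlt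
        rw [hn]
        have hsk : PySem.Chars.startswith fname.toList k.toList = true := by
          simp [PySem.Chars.startswith_iff, hpre]
        simp [hsk]
      rw [h0, hs1, hs2, hfind]
      rfl

theorem search_by_filename_eq_alt (fname : String) (lookup : List (String × String)) :
    search_by_filename fname lookup = search_by_filename_alt fname lookup := by
  unfold search_by_filename search_by_filename_alt
  simp only [loopA_eq_findSome?, prefScanA_eq_find?, foldl_bestStep_none]
  exact search_by_filename_eq_alt_main fname (PySem.Dict.ofList lookup)

-- ===== VERDICT (by name: the statement is the Claim_ definition above) =====
theorem search_by_filename_spec : Claim_equal_search_by_filename := by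
  intro fname lookup _ _
  exact search_by_filename_eq_alt fname lookup
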